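-- pv_equiv track=rewrite | github.com/Sachin2k05/DAA | assignment 6.py | fuel_cost
-- ===== SOURCE A (Python) =====
-- def fuel_cost(r, s):
--     from collections import defaultdict, deque
--     g = defaultdict(list)
--     for u, v in r:
--         g[u].append(v)
--         g[v].append(u)
--     def bfs():
--         q = deque([0])
--         visited = {0}
--         cost = 0
--         while q:
--             for _ in range(len(q)):
--                 u = q.popleft()
--                 for v in g[u]:
--                     if v not in visited:
--                         q.append(v)
--                         visited.add(v)
--                         cost += 1
--         return cost
--     return bfs()
-- ===== SOURCE B (Python) =====
-- def fuel_cost(r, s):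
--     # Component of node 0 by edge-relaxation passes (no adjacency structure, no queue):
--     # each pass sweeps the edge list and pulls endpoints into 0's component; stop when stable.
--     comp = {0}
--     for _ in range(2 * len(r) + 1):
--         added = False
--         for u, v in r:
--             if u in comp and v not in comp:
--                 comp.add(v)
--                 added = True
--             elif v in comp and u not in comp:
--                 comp.add(u)
--                 added = True
--         if not added:
--             break
--     return len(comp) - 1
-- ===== Notes on version B (the rewrite author's own statement) =====
-- stated objective: alternative
-- what changed: Replaces BFS (adjacency dict + deque frontier + visited set) by repeated relaxation passes over the raw edge list that grow node 0's component to a fixed point, then returns the component size minus 1.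
import Mathlib
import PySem

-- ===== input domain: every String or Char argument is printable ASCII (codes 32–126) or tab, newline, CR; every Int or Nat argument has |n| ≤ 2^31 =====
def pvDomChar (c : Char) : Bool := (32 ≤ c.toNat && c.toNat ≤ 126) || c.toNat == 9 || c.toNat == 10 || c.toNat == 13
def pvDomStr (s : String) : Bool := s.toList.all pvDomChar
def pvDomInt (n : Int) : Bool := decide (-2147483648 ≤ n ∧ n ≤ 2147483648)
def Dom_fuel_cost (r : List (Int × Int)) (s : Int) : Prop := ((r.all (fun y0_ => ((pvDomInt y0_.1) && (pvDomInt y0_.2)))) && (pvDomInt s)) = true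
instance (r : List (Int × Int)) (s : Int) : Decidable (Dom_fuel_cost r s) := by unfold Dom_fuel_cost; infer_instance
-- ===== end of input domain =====

-- A = BFS from node 0 counting newly visited nodes; B = edge-relaxation closure of 0's component,
-- returning its size minus one. Equivalence: both equal |component(0)| - 1.

-- ===== PORT A =====
-- g = defaultdict(list); for u, v in r: g[u].append(v); g[v].append(u)
def pvBuildG (r : List (Int × Int)) : PySem.Dict Int (List Int) :=
  r.foldl (fun g p => (g.modify p.1 [] (· ++ [p.2])).modify p.2 [] (· ++ [p.1])) PySem.Dict.empty

-- for v in g[u]: if v not in visited: q.append(v); visited.add(v); cost += 1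
-- state: (queue-being-built, visited, cost)
def pvInner (st : List Int × List Int × Int) (v : Int) : List Int × List Int × Int :=
  if v ∈ st.2.1 then st else (st.1 ++ [v], PySem.Set.add st.2.1 v, st.2.2 + 1)

-- one BFS level: 'for _ in range(len(q)): u = q.popleft(); for v in g[u]: …'
-- (items appended during the level are exactly the queue for the next level)
def pvLevel (g : PySem.Dict Int (List Int)) (q vis : List Int) (c : Int) :
    List Int × List Int × Int :=
  q.foldl (fun st u => (PySem.Dict.getD g u []).foldl pvInner st) ([], vis, c)

-- while q: …  (fuel-bounded; the proof shows 2*|r|+1 levels always suffice)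
def pvBfs (g : PySem.Dict Int (List Int)) : Nat → List Int → List Int → Int → Int
  | 0, _, _, c => c
  | n + 1, q, vis, c =>
    if q = [] then c
    else
      let st := pvLevel g q vis c
      pvBfs g n st.1 st.2.1 st.2.2

def fuel_cost (r : List (Int × Int)) (s : Int) : Int :=
  pvBfs (pvBuildG r) (2 * r.length + 1) [0] [0] 0

-- ===== PORT B =====
-- one pass of 'for u, v in r: if u in comp and v not in comp: … elif v in comp and u not in comp: …'
def pvPassStep (st : List Int × Bool) (p : Int × Int) : List Int × Bool :=
  if p.1 ∈ st.1 ∧ p.2 ∉ st.1 then (PySem.Set.add st.1 p.2, true)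
  else if p.2 ∈ st.1 ∧ p.1 ∉ st.1 then (PySem.Set.add st.1 p.1, true)
  else st

-- 'for _ in range(2*len(r)+1): …; if not added: break'
def pvCloseLoop (r : List (Int × Int)) : Nat → List Int → List Int
  | 0, comp => comp
  | n + 1, comp =>
    let st := r.foldl pvPassStep (comp, false)
    if st.2 then pvCloseLoop r n st.1 else st.1

def fuel_cost_alt (r : List (Int × Int)) (s : Int) : Int :=
  ((pvCloseLoop r (2 * r.length + 1) [0]).length : Int) - 1

-- ===== PRECONDITION & SPEC =====
def Spec_fuel_cost (r : List (Int × Int)) (s : Int) (out : Int) : Prop := out = fuel_cost_alt r s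
instance (r : List (Int × Int)) (s : Int) (out : Int) : Decidable (Spec_fuel_cost r s out) := by unfold Spec_fuel_cost; infer_instance

-- ===== CLAIM (what is proved, stated in full; the proofs are below) =====
def Claim_equal_fuel_cost : Prop := ∀ (r : List (Int × Int)) (s : Int), Dom_fuel_cost r s → Spec_fuel_cost r s (fuel_cost r s)

-- ===== LEMMAS AND PROOFS =====

-- undirected adjacency of the edge list, reachability from 0
def pvAdj (r : List (Int × Int)) (a b : Int) : Prop := (a, b) ∈ r ∨ (b, a) ∈ r
def pvReach (r : List (Int × Int)) (x : Int) : Prop := Relation.ReflTransGen (pvAdj r) 0 x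
-- 0 together with all edge endpoints, deduplicated
def pvU (r : List (Int × Int)) : List Int :=
  PySem.Set.ofList (0 :: r.flatMap (fun p => [p.1, p.2]))

theorem mem_pvU {r : List (Int × Int)} {x : Int} :
    x ∈ pvU r ↔ x = 0 ∨ ∃ p ∈ r, x = p.1 ∨ x = p.2 := by
  simp only [pvU, PySem.Set.mem_ofList, List.mem_cons, List.mem_flatMap,
    List.not_mem_nil, or_false]

theorem length_pvU_le (r : List (Int × Int)) : (pvU r).length ≤ 2 * r.length + 1 := by
  have h := PySem.Set.length_ofList_le (0 :: r.flatMap (fun p => [p.1, p.2]))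
  have hlen : (r.flatMap (fun p : Int × Int => [p.1, p.2])).length = 2 * r.length := by
    induction r with
    | nil => simp
    | cons p r ih => simp only [List.flatMap_cons, List.length_append, List.length_cons]; simp; omega
  simp only [pvU]
  calc (PySem.Set.ofList (0 :: r.flatMap (fun p => [p.1, p.2]))).length
      ≤ (0 :: r.flatMap (fun p : Int × Int => [p.1, p.2])).length := h
    _ = 2 * r.length + 1 := by simp [hlen]

theorem endpoint_mem_pvU {r : List (Int × Int)} {u v : Int} (h : pvAdj r u v) : v ∈ pvU r := by
  rcases h with h | h
  · exact mem_pvU.mpr (Or.inr ⟨(u, v), h, Or.inr rfl⟩)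
  · exact mem_pvU.mpr (Or.inr ⟨(v, u), h, Or.inl rfl⟩)

theorem reach_mem_of_closed {r : List (Int × Int)} {c : List Int}
    (h0 : 0 ∈ c) (hclo : ∀ u ∈ c, ∀ v, pvAdj r u v → v ∈ c) {x : Int}
    (hx : pvReach r x) : x ∈ c := by
  induction hx with
  | refl => exact h0
  | tail _ e ih => exact hclo _ ih _ e

-- a nodup subset of pvU with full length contains all of pvU, hence is adjacency-closed
theorem closed_of_saturated {r : List (Int × Int)} {c : List Int}
    (hnd : c.Nodup) (hsub : ∀ x ∈ c, x ∈ pvU r) (hlen : (pvU r).length ≤ c.length) :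
    ∀ u ∈ c, ∀ v, pvAdj r u v → v ∈ c := by
  have hsp : List.Subperm c (pvU r) := (List.subperm_ext_iff.mpr (fun a ha => by
    have h1 : c.count a ≤ 1 := List.nodup_iff_count_le_one.mp hnd a
    have h2 : 1 ≤ (pvU r).count a := List.count_pos_iff.mpr (hsub a ha)
    omega))
  have hperm : c.Perm (pvU r) := hsp.perm_of_length_le hlen
  intro u _ v hv
  exact hperm.mem_iff.mpr (endpoint_mem_pvU hv)

-- strict growth of a nodup list that gains a member
theorem length_lt_of_new {c c' : List Int} (hnd : c.Nodup) (hsub : ∀ x ∈ c, x ∈ c')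
    (hx : ∃ x ∈ c', x ∉ c) : c.length < c'.length := by
  rcases hx with ⟨x, hx', hx⟩
  have hnd' : (x :: c).Nodup := List.nodup_cons.mpr ⟨hx, hnd⟩
  have hsp : List.Subperm (x :: c) c' := by
    refine List.subperm_ext_iff.mpr (fun a ha => ?_)
    have hmem : a ∈ c' := by
      rcases List.mem_cons.mp ha with h | h
      · exact h ▸ hx'
      · exact hsub a h
    have h1 : (x :: c).count a ≤ 1 := List.nodup_iff_count_le_one.mp hnd' a
    have h2 : 1 ≤ c'.count a := List.count_pos_iff.mpr hmem
    omega
  have := hsp.length_le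
  simpa using this

-- membership of the adjacency dict built by A
theorem mem_buildG_fold (r : List (Int × Int)) (g : PySem.Dict Int (List Int)) (u v : Int) :
    v ∈ (r.foldl (fun g p => (g.modify p.1 [] (· ++ [p.2])).modify p.2 [] (· ++ [p.1])) g).getD u []
      ↔ v ∈ g.getD u [] ∨ (u, v) ∈ r ∨ (v, u) ∈ r := by
  induction r generalizing g with
  | nil => simp
  | cons p r ih =>
    simp only [List.foldl_cons, ih, List.mem_cons]
    have hmod : ∀ w,
        w ∈ ((g.modify p.1 [] (· ++ [p.2])).modify p.2 [] (· ++ [p.1])).getD u []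
          ↔ w ∈ g.getD u [] ∨ (u = p.1 ∧ w = p.2) ∨ (u = p.2 ∧ w = p.1) := by
      intro w
      simp only [PySem.Dict.getD_modify]
      by_cases h2 : u = p.2 <;> by_cases h1 : u = p.1 <;> simp_all
    rw [hmod]
    have hp : ∀ a b : Int, (a, b) = p ↔ a = p.1 ∧ b = p.2 := by
      intro a b; cases p; simp [Prod.ext_iff]
    rw [hp, hp]
    tauto

theorem mem_gN {r : List (Int × Int)} {u v : Int} :
    v ∈ (pvBuildG r).getD u [] ↔ pvAdj r u v := by
  have := mem_buildG_fold r PySem.Dict.empty u v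
  simpa [pvBuildG, pvAdj, PySem.Dict.getD_empty] using this

-- ---------- A side: invariants of the BFS ----------

-- combined invariant for the inner neighbour loop
theorem inner_fold_props (r : List (Int × Int)) (u : Int) (hu : pvReach r u) :
    ∀ (ns : List Int), (∀ v ∈ ns, pvAdj r u v) →
    ∀ (q vis : List Int) (c : Int),
      vis.Nodup → (∀ x ∈ q, x ∈ vis) → (∀ x ∈ vis, pvReach r x) →
      (∀ x ∈ vis, x ∈ pvU r) → c = (vis.length : Int) - 1 → 0 ∈ vis →
      (let st := ns.foldl pvInner (q, vis, c)
       st.2.1.Nodup ∧ (∀ x ∈ vis, x ∈ st.2.1) ∧ (∀ x ∈ st.1, x ∈ q ∨ x ∉ vis) ∧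
       (∀ x ∈ st.1, x ∈ st.2.1) ∧ (∀ x ∈ st.2.1, pvReach r x) ∧
       (∀ x ∈ st.2.1, x ∈ pvU r) ∧ st.2.2 = (st.2.1.length : Int) - 1 ∧ 0 ∈ st.2.1 ∧
       (∀ v ∈ ns, v ∈ st.2.1) ∧ (∀ x ∈ st.2.1, x ∈ vis ∨ x ∈ st.1) ∧ (∀ x ∈ q, x ∈ st.1)) := by
  intro ns
  induction ns with
  | nil =>
    intro _ q vis c hnd hq hre hU hc h0
    exact ⟨hnd, fun x h => h, fun x h => Or.inl h, hq, hre, hU, hc, h0,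
      by simp, fun x h => Or.inl h, fun x h => h⟩
  | cons v0 ns ih =>
    intro hadj q vis c hnd hq hre hU hc h0
    have hv : pvAdj r u v0 := hadj v0 (by simp)
    by_cases hvis : v0 ∈ vis
    · have hstep : pvInner (q, vis, c) v0 = (q, vis, c) := by simp [pvInner, hvis]
      simp only [List.foldl_cons, hstep]
      have h := ih (fun w hw => hadj w (by simp [hw])) q vis c hnd hq hre hU hc h0
      refine ⟨h.1, h.2.1, h.2.2.1, h.2.2.2.1, h.2.2.2.2.1, h.2.2.2.2.2.1, h.2.2.2.2.2.2.1,
        h.2.2.2.2.2.2.2.1, ?_, h.2.2.2.2.2.2.2.2.2.1, h.2.2.2.2.2.2.2.2.2.2⟩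
      intro w hw
      rcases List.mem_cons.mp hw with h' | h'
      · subst h'; exact h.2.1 w hvis
      · exact h.2.2.2.2.2.2.2.2.1 w h'
    · have hstep : pvInner (q, vis, c) v0 = (q ++ [v0], vis ++ [v0], c + 1) := by
        simp [pvInner, hvis]
      simp only [List.foldl_cons, hstep]
      have hnd' : (vis ++ [v0]).Nodup := by
        simp [List.nodup_append, hnd]; intro a ha hav; exact hvis (hav ▸ ha)
      have hq' : ∀ x ∈ q ++ [v0], x ∈ vis ++ [v0] := by
        intro x hx; rcases List.mem_append.mp hx with h | h
        · exact List.mem_append.mpr (Or.inl (hq x h))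
        · exact List.mem_append.mpr (Or.inr h)
      have hre' : ∀ x ∈ vis ++ [v0], pvReach r x := by
        intro x hx; rcases List.mem_append.mp hx with h | h
        · exact hre x h
        · simp at h; subst h; exact hu.tail hv
      have hU' : ∀ x ∈ vis ++ [v0], x ∈ pvU r := by
        intro x hx; rcases List.mem_append.mp hx with h | h
        · exact hU x h
        · simp at h; subst h; exact endpoint_mem_pvU hv
      have hc' : c + 1 = ((vis ++ [v0]).length : Int) - 1 := by
        simp [List.length_append]; omega
      have h0' : 0 ∈ vis ++ [v0] := List.mem_append.mpr (Or.inl h0)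
      have h := ih (fun w hw => hadj w (by simp [hw])) (q ++ [v0]) (vis ++ [v0]) (c + 1)
        hnd' hq' hre' hU' hc' h0'
      refine ⟨h.1, ?_, ?_, h.2.2.2.1, h.2.2.2.2.1, h.2.2.2.2.2.1, h.2.2.2.2.2.2.1,
        h.2.2.2.2.2.2.2.1, ?_, ?_, ?_⟩
      · intro x hx; exact h.2.1 x (List.mem_append.mpr (Or.inl hx))
      · intro x hx
        rcases h.2.2.1 x hx with h' | h'
        · rcases List.mem_append.mp h' with h'' | h''
          · exact Or.inl h''
          · simp at h''; subst h''; exact Or.inr hvis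
        · exact Or.inr (fun hmem => h' (List.mem_append.mpr (Or.inl hmem)))
      · intro w hw
        rcases List.mem_cons.mp hw with h' | h'
        · subst h'; exact h.2.1 w (List.mem_append.mpr (Or.inr (by simp)))
        · exact h.2.2.2.2.2.2.2.2.1 w h'
      · intro x hx
        rcases h.2.2.2.2.2.2.2.2.2.1 x hx with h' | h'
        · rcases List.mem_append.mp h' with h'' | h''
          · exact Or.inl h''
          · simp at h''; rw [h'']
            exact Or.inr (h.2.2.2.2.2.2.2.2.2.2 v0 (List.mem_append.mpr (Or.inr (by simp))))
        · exact Or.inr h'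
      · intro x hx; exact h.2.2.2.2.2.2.2.2.2.2 x (List.mem_append.mpr (Or.inl hx))

-- combined invariant for one whole BFS level (fold over the popped queue l)
theorem outer_fold_props (r : List (Int × Int)) :
    ∀ (l : List Int), (∀ u ∈ l, pvReach r u) →
    ∀ (q vis : List Int) (c : Int),
      vis.Nodup → (∀ x ∈ q, x ∈ vis) → (∀ x ∈ vis, pvReach r x) →
      (∀ x ∈ vis, x ∈ pvU r) → c = (vis.length : Int) - 1 → 0 ∈ vis →
      (let st := l.foldl (fun st u => ((pvBuildG r).getD u []).foldl pvInner st) (q, vis, c)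
       st.2.1.Nodup ∧ (∀ x ∈ vis, x ∈ st.2.1) ∧ (∀ x ∈ st.1, x ∈ q ∨ x ∉ vis) ∧
       (∀ x ∈ st.1, x ∈ st.2.1) ∧ (∀ x ∈ st.2.1, pvReach r x) ∧
       (∀ x ∈ st.2.1, x ∈ pvU r) ∧ st.2.2 = (st.2.1.length : Int) - 1 ∧ 0 ∈ st.2.1 ∧
       (∀ u ∈ l, ∀ v, pvAdj r u v → v ∈ st.2.1) ∧ (∀ x ∈ st.2.1, x ∈ vis ∨ x ∈ st.1) ∧
       (∀ x ∈ q, x ∈ st.1)) := by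
  intro l
  induction l with
  | nil =>
    intro _ q vis c hnd hq hre hU hc h0
    exact ⟨hnd, fun x h => h, fun x h => Or.inl h, hq, hre, hU, hc, h0,
      by simp, fun x h => Or.inl h, fun x h => h⟩
  | cons u l ih =>
    intro hul q vis c hnd hq hre hU hc h0
    have hu : pvReach r u := hul u (by simp)
    have hadj : ∀ v ∈ (pvBuildG r).getD u [], pvAdj r u v := fun v hv => mem_gN.mp hv
    have h1 := inner_fold_props r u hu ((pvBuildG r).getD u []) hadj q vis c
      hnd hq hre hU hc h0
    simp only [List.foldl_cons]
    set st1 := ((pvBuildG r).getD u []).foldl pvInner (q, vis, c) with hst1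
    obtain ⟨a1, a2, a3, a4, a5, a6, a7, a8, a9, a10, a11⟩ := h1
    have h2 := ih (fun w hw => hul w (by simp [hw])) st1.1 st1.2.1 st1.2.2
      a1 a4 a5 a6 a7 a8
    have hrw : (st1.1, st1.2.1, st1.2.2) = st1 := rfl
    rw [hrw] at h2
    obtain ⟨b1, b2, b3, b4, b5, b6, b7, b8, b9, b10, b11⟩ := h2
    refine ⟨b1, fun x hx => b2 x (a2 x hx), ?_, b4, b5, b6, b7, b8, ?_, ?_, ?_⟩
    · intro x hx
      rcases b3 x hx with h' | h'
      · exact a3 x h'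
      · exact Or.inr (fun hmem => h' (a2 x hmem))
    · intro w hw v hv
      rcases List.mem_cons.mp hw with h' | h'
      · subst h'; exact b2 v (a9 v (mem_gN.mpr hv))
      · exact b9 w h' v hv
    · intro x hx
      rcases b10 x hx with h' | h'
      · rcases a10 x h' with h'' | h''
        · exact Or.inl h''
        · exact Or.inr (b11 x h'')
      · exact Or.inr h'
    · intro x hx; exact b11 x (a11 x hx)

-- the BFS loop returns |component(0)| - 1 whenever the fuel is at least |pvU| - |vis|
theorem bfs_char (r : List (Int × Int)) :
    ∀ (n : Nat) (q vis : List Int) (c : Int),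
      vis.Nodup → (∀ x ∈ q, x ∈ vis) → (∀ x ∈ vis, pvReach r x) →
      (∀ x ∈ vis, x ∈ pvU r) → c = (vis.length : Int) - 1 → 0 ∈ vis →
      (∀ u ∈ vis, u ∈ q ∨ ∀ v, pvAdj r u v → v ∈ vis) →
      (pvU r).length ≤ vis.length + n →
      ∃ L : List Int, L.Nodup ∧ (∀ x, x ∈ L ↔ pvReach r x) ∧
        pvBfs (pvBuildG r) n q vis c = (L.length : Int) - 1 := by
  intro n
  induction n with
  | zero =>
    intro q vis c hnd hq hre hU hc h0 _ hfuel
    refine ⟨vis, hnd, fun x => ⟨hre x, ?_⟩, by simpa [pvBfs] using hc⟩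
    exact fun hx => reach_mem_of_closed h0 (closed_of_saturated hnd hU (by omega)) hx
  | succ n ih =>
    intro q vis c hnd hq hre hU hc h0 hfr hfuel
    by_cases hqe : q = []
    · subst hqe
      have hclo : ∀ u ∈ vis, ∀ v, pvAdj r u v → v ∈ vis := by
        intro u hu v hv
        rcases hfr u hu with h | h
        · simp at h
        · exact h v hv
      exact ⟨vis, hnd, fun x => ⟨hre x, reach_mem_of_closed h0 hclo⟩,
        by simpa [pvBfs] using hc⟩
    · have hql : ∀ u ∈ q, pvReach r u := fun u hu => hre u (hq u hu)
      have h := outer_fold_props r q hql [] vis c hnd (by simp) hre hU hc h0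
      simp only [pvBfs, hqe]
      have hlv : pvLevel (pvBuildG r) q vis c =
          q.foldl (fun st u => ((pvBuildG r).getD u []).foldl pvInner st) ([], vis, c) := rfl
      rw [← hlv] at h
      set st := pvLevel (pvBuildG r) q vis c with hst
      obtain ⟨a1, a2, a3, a4, a5, a6, a7, a8, a9, a10, a11⟩ := h
      have hfr' : ∀ u ∈ st.2.1, u ∈ st.1 ∨ ∀ v, pvAdj r u v → v ∈ st.2.1 := by
        intro u hu
        rcases a10 u hu with h' | h'
        · rcases hfr u h' with h'' | h''
          · exact Or.inr (fun v hv => a9 u h'' v hv)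
          · exact Or.inr (fun v hv => a2 v (h'' v hv))
        · exact Or.inl h'
      by_cases hq'e : st.1 = []
      · -- next queue empty: visited is closed, loop returns st's cost whatever the fuel
        have hclo : ∀ u ∈ st.2.1, ∀ v, pvAdj r u v → v ∈ st.2.1 := by
          intro u hu v hv
          rcases hfr' u hu with h' | h'
          · rw [hq'e] at h'; simp at h'
          · exact h' v hv
        have hret : pvBfs (pvBuildG r) n st.1 st.2.1 st.2.2 = st.2.2 := by
          cases n <;> simp [pvBfs, hq'e]
        exact ⟨st.2.1, a1, fun x => ⟨a5 x, reach_mem_of_closed a8 hclo⟩, by rw [hret]; exact a7⟩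
      · -- next queue nonempty: visited strictly grew, recurse
        have hx : ∃ x ∈ st.2.1, x ∉ vis := by
          rcases List.exists_mem_of_ne_nil st.1 hq'e with ⟨x, hx⟩
          rcases a3 x hx with h' | h'
          · simp at h'
          · exact ⟨x, a4 x hx, h'⟩
        have hlt : vis.length < st.2.1.length := length_lt_of_new hnd a2 hx
        exact ih st.1 st.2.1 st.2.2 a1 a4 a5 a6 a7 a8 hfr' (by omega)

theorem fuel_cost_char (r : List (Int × Int)) (s : Int) :
    ∃ L : List Int, L.Nodup ∧ (∀ x, x ∈ L ↔ pvReach r x) ∧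
      fuel_cost r s = (L.length : Int) - 1 := by
  have h0U : (0 : Int) ∈ pvU r := mem_pvU.mpr (Or.inl rfl)
  have := bfs_char r (2 * r.length + 1) [0] [0] 0
    (by simp) (by simp) (by intro x hx; simp at hx; subst hx; exact Relation.ReflTransGen.refl)
    (by intro x hx; simp at hx; subst hx; exact h0U) (by simp) (by simp)
    (by intro u hu; exact Or.inl hu)
    (by have := length_pvU_le r; simp; omega)
  simpa [fuel_cost] using this

-- ---------- B side: invariants of the relaxation pass ----------

theorem pass_fold_props (r : List (Int × Int)) :
    ∀ (l : List (Int × Int)), (∀ p ∈ l, p ∈ r) →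
    ∀ (c : List Int) (a : Bool),
      c.Nodup → (∀ x ∈ c, pvReach r x) → (∀ x ∈ c, x ∈ pvU r) → 0 ∈ c →
      (let st := l.foldl pvPassStep (c, a)
       st.1.Nodup ∧ (∀ x ∈ c, x ∈ st.1) ∧ (∀ x ∈ st.1, pvReach r x) ∧
       (∀ x ∈ st.1, x ∈ pvU r) ∧ 0 ∈ st.1 ∧ c.length ≤ st.1.length ∧
       (st.2 = false → st.1 = c ∧ a = false ∧ ∀ p ∈ l, (p.1 ∈ c ↔ p.2 ∈ c)) ∧
       (a = false → st.2 = true → c.length < st.1.length)) := by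
  intro l
  induction l with
  | nil =>
    intro _ c a hnd hre hU h0
    exact ⟨hnd, fun x h => h, hre, hU, h0, le_refl _,
      fun hf => ⟨rfl, by simp at hf; exact hf, by simp⟩, fun ha hf => by simp_all⟩
  | cons p0 l ih =>
    intro hl c a hnd hre hU h0
    have hpr : p0 ∈ r := hl p0 (by simp)
    have hl' : ∀ q ∈ l, q ∈ r := fun q hq => hl q (by simp [hq])
    simp only [List.foldl_cons]
    by_cases h1 : p0.1 ∈ c ∧ p0.2 ∉ c
    · have hstep : pvPassStep (c, a) p0 = (c ++ [p0.2], true) := by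
        simp [pvPassStep, h1]
      rw [hstep]
      have hnd' : (c ++ [p0.2]).Nodup := by
        simp [List.nodup_append, hnd]; intro a ha hav; exact h1.2 (hav ▸ ha)
      have hre' : ∀ x ∈ c ++ [p0.2], pvReach r x := by
        intro x hx; rcases List.mem_append.mp hx with h | h
        · exact hre x h
        · simp at h; subst h; exact (hre _ h1.1).tail (Or.inl hpr)
      have hU' : ∀ x ∈ c ++ [p0.2], x ∈ pvU r := by
        intro x hx; rcases List.mem_append.mp hx with h | h
        · exact hU x h
        · simp at h; subst h; exact endpoint_mem_pvU (r := r) (u := p0.1) (Or.inl hpr)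
      have h0' : 0 ∈ c ++ [p0.2] := List.mem_append.mpr (Or.inl h0)
      have h := ih hl' (c ++ [p0.2]) true hnd' hre' hU' h0'
      obtain ⟨b1, b2, b3, b4, b5, b6, b7, b8⟩ := h
      refine ⟨b1, fun x hx => b2 x (List.mem_append.mpr (Or.inl hx)), b3, b4, b5, ?_, ?_, ?_⟩
      · have : (c ++ [p0.2]).length = c.length + 1 := by simp
        omega
      · intro hf; exact absurd (b7 hf).2.1 (by simp)
      · intro _ _
        have : (c ++ [p0.2]).length = c.length + 1 := by simp
        omega
    · by_cases h2 : p0.2 ∈ c ∧ p0.1 ∉ c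
      · have hstep : pvPassStep (c, a) p0 = (c ++ [p0.1], true) := by
          simp only [pvPassStep, if_neg h1, if_pos h2, PySem.Set.add_of_not_mem h2.2]
        rw [hstep]
        have hnd' : (c ++ [p0.1]).Nodup := by
          simp [List.nodup_append, hnd]; intro a ha hav; exact h2.2 (hav ▸ ha)
        have hre' : ∀ x ∈ c ++ [p0.1], pvReach r x := by
          intro x hx; rcases List.mem_append.mp hx with h | h
          · exact hre x h
          · simp at h; subst h; exact (hre _ h2.1).tail (Or.inr hpr)
        have hU' : ∀ x ∈ c ++ [p0.1], x ∈ pvU r := by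
          intro x hx; rcases List.mem_append.mp hx with h | h
          · exact hU x h
          · simp at h; subst h
            exact endpoint_mem_pvU (r := r) (u := p0.2) (Or.inr hpr)
        have h0' : 0 ∈ c ++ [p0.1] := List.mem_append.mpr (Or.inl h0)
        have h := ih hl' (c ++ [p0.1]) true hnd' hre' hU' h0'
        obtain ⟨b1, b2, b3, b4, b5, b6, b7, b8⟩ := h
        refine ⟨b1, fun x hx => b2 x (List.mem_append.mpr (Or.inl hx)), b3, b4, b5, ?_, ?_, ?_⟩
        · have : (c ++ [p0.1]).length = c.length + 1 := by simp
          omega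
        · intro hf; exact absurd (b7 hf).2.1 (by simp)
        · intro _ _
          have : (c ++ [p0.1]).length = c.length + 1 := by simp
          omega
      · have hstep : pvPassStep (c, a) p0 = (c, a) := by
          simp only [pvPassStep, if_neg h1, if_neg h2]
        rw [hstep]
        have h := ih hl' c a hnd hre hU h0
        obtain ⟨b1, b2, b3, b4, b5, b6, b7, b8⟩ := h
        refine ⟨b1, b2, b3, b4, b5, b6, ?_, b8⟩
        intro hf
        obtain ⟨e1, e2, e3⟩ := b7 hf
        refine ⟨e1, e2, ?_⟩
        intro q hq
        rcases List.mem_cons.mp hq with h' | h'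
        · subst h'; constructor <;> intro h'' <;> by_contra h''' <;> tauto
        · exact e3 q h'

theorem close_char (r : List (Int × Int)) :
    ∀ (n : Nat) (c : List Int),
      c.Nodup → (∀ x ∈ c, pvReach r x) → (∀ x ∈ c, x ∈ pvU r) → 0 ∈ c →
      (pvU r).length ≤ c.length + n →
      (pvCloseLoop r n c).Nodup ∧ (∀ x, x ∈ pvCloseLoop r n c ↔ pvReach r x) := by
  intro n
  induction n with
  | zero =>
    intro c hnd hre hU h0 hfuel
    refine ⟨hnd, fun x => ⟨hre x, ?_⟩⟩
    exact fun hx => reach_mem_of_closed h0 (closed_of_saturated hnd hU (by omega)) hx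
  | succ n ih =>
    intro c hnd hre hU h0 hfuel
    have h := pass_fold_props r r (fun p hp => hp) c false hnd hre hU h0
    simp only [pvCloseLoop]
    set st := r.foldl pvPassStep (c, false) with hst
    obtain ⟨b1, b2, b3, b4, b5, b6, b7, b8⟩ := h
    by_cases hf : st.2 = true
    · rw [if_pos hf]
      exact ih st.1 b1 b3 b4 b5 (by have := b8 rfl hf; omega)
    · have hf' : st.2 = false := by simpa using hf
      rw [if_neg (by simp [hf'])]
      obtain ⟨e1, _, e3⟩ := b7 hf'
      rw [e1]
      have hclo : ∀ u ∈ c, ∀ v, pvAdj r u v → v ∈ c := by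
        intro u hu v hv
        rcases hv with h' | h'
        · exact (e3 _ h').mp hu
        · exact (e3 _ h').mpr hu
      exact ⟨hnd, fun x => ⟨hre x, reach_mem_of_closed h0 hclo⟩⟩

theorem fuel_cost_alt_char (r : List (Int × Int)) (s : Int) :
    ∃ L : List Int, L.Nodup ∧ (∀ x, x ∈ L ↔ pvReach r x) ∧
      fuel_cost_alt r s = (L.length : Int) - 1 := by
  have h0U : (0 : Int) ∈ pvU r := mem_pvU.mpr (Or.inl rfl)
  have h := close_char r (2 * r.length + 1) [0]
    (by simp) (by intro x hx; simp at hx; subst hx; exact Relation.ReflTransGen.refl)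
    (by intro x hx; simp at hx; subst hx; exact h0U) (by simp)
    (by have := length_pvU_le r; simp; omega)
  exact ⟨pvCloseLoop r (2 * r.length + 1) [0], h.1, h.2, rfl⟩

-- ===== VERDICT (by name: the statement is the Claim_ definition above) =====
theorem fuel_cost_spec : Claim_equal_fuel_cost := by
  intro r s _
  unfold Spec_fuel_cost
  obtain ⟨LA, hA1, hA2, hA3⟩ := fuel_cost_char r s
  obtain ⟨LB, hB1, hB2, hB3⟩ := fuel_cost_alt_char r s
  have hperm : List.Perm LA LB :=
    (List.perm_ext_iff_of_nodup hA1 hB1).mpr (fun x => by rw [hA2 x, hB2 x])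
  rw [hA3, hB3, hperm.length_eq]
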